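-- pv_equiv track=rewrite | github.com/Stagakis/tennis-scoreboard-and-score-detection | score_and_board_detection/score_and_board_evaluation.py | get_score_in_dbformat
-- ===== SOURCE A (Python) =====
-- def get_score_in_dbformat(score):
--     out = ""
--     for num in score:
--         if ' ' in num:
--             out = out + get_score_in_dbformat(num.split(' ')) + '-'
--         else:
--             out = out + num + '-'
--     return out[:-1]  # remove the last since its bound to be a '-' character
-- ===== SOURCE B (Python) =====
-- def get_score_in_dbformat(score):
--     return '-'.join(num.replace(' ', '-') for num in score)
-- ===== Notes on version B (the rewrite author's own statement) =====
-- stated objective: faster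
-- what changed: Replaces A's recursion-on-split with repeated string concatenation and trailing-dash trimming by a single pass: each element's spaces become dashes via str.replace and str.join inserts the separators.
import Mathlib
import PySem

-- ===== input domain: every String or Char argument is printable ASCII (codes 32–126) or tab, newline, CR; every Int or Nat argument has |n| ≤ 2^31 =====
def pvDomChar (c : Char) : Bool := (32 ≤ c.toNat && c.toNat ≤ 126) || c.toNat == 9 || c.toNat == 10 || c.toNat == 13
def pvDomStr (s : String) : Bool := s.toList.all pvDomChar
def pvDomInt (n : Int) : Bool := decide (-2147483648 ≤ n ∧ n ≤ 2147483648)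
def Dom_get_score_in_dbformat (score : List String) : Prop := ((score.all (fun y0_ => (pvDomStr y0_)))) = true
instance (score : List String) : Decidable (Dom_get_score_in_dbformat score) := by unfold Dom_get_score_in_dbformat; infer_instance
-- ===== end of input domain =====

-- B replaces A's recursion-on-split plus trailing-dash trimming by a single join over
-- space-to-dash-replaced elements (idiomatic, no recursion, no slicing).


-- ===== PORT A =====
-- Helpers the port's termination proof needs (splitting at ' ' modelled by splitSp):
def splitSp (cur : List Char) : List Char → List (List Char)
  | [] => [cur.reverse]
  | c :: t => if c = ' ' then cur.reverse :: splitSp [] t else splitSp (c :: cur) t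

theorem splitOn_go_space (l : List Char) : ∀ (fuel : Nat) (cur : List Char) (acc : List (List Char)),
    l.length < fuel →
    PySem.Chars.splitOn.go [' '] fuel l cur acc = acc.reverse ++ splitSp cur l := by
  induction l with
  | nil =>
    intro fuel cur acc h
    match fuel with
    | fuel+1 => simp [PySem.Chars.splitOn.go, splitSp]
  | cons c t ih =>
    intro fuel cur acc h
    match fuel with
    | fuel+1 =>
      rw [PySem.Chars.splitOn.go]
      by_cases hc : c = ' '
      · subst hc
        simp only [List.isPrefixOf]
        simp [ih _ _ _ (by simpa using h), splitSp]
      · have hp : [' '].isPrefixOf (c :: t) = false := by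
          simp [List.isPrefixOf, Ne.symm hc]
        rw [hp]
        simp only [Bool.false_eq_true, if_false]
        rw [ih _ _ _ (by simp at h ⊢; omega)]
        simp [splitSp, hc]

theorem splitOn_space (cs : List Char) : PySem.Chars.splitOn cs [' '] = splitSp [] cs := by
  have := splitOn_go_space cs (cs.length + 1) [] [] (by omega)
  simpa [PySem.Chars.splitOn] using this

theorem length_splitSp (l : List Char) : ∀ cur, (splitSp cur l).length = l.count ' ' + 1 := by
  induction l with
  | nil => intro cur; simp [splitSp]
  | cons c t ih =>
    intro cur
    by_cases hc : c = ' '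
    · subst hc; simp [splitSp, ih]
    · simp [splitSp, hc, ih]

theorem no_space_splitSp (l : List Char) : ∀ cur p, ' ' ∉ cur → p ∈ splitSp cur l → ' ' ∉ p := by
  induction l with
  | nil => intro cur p hcur hp; simp [splitSp] at hp; subst hp; simpa using hcur
  | cons c t ih =>
    intro cur p hcur hp
    by_cases hc : c = ' '
    · subst hc
      simp [splitSp] at hp
      rcases hp with hp | hp
      · subst hp; simpa using hcur
      · exact ih [] p (by simp) hp
    · simp [splitSp, hc] at hp
      exact ih (c :: cur) p (by simp [hcur, Ne.symm hc]) hp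

theorem singleton_infix (a : Char) (l : List Char) : [a] <:+: l ↔ a ∈ l := by
  constructor
  · rintro ⟨s, t, rfl⟩; simp
  · intro h
    obtain ⟨s, t, rfl⟩ := List.append_of_mem h
    exact ⟨s, t, by simp⟩

def spMeasure (score : List String) : Nat :=
  2 * (score.map (fun s => s.toList.count ' ')).sum + score.length

theorem spMeasure_cons (n : String) (r : List String) :
    spMeasure (n :: r) = 2 * n.toList.count ' ' + spMeasure r + 1 := by
  simp [spMeasure]; ring

theorem split_parts (num : String) :
    (PySem.Str.split? num " ").getD [] = (splitSp [] num.toList).map String.ofList := by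
  simp [PySem.Str.split?, PySem.Chars.split?, splitOn_space]

theorem spMeasure_split (num : String) :
    spMeasure ((PySem.Str.split? num " ").getD []) = num.toList.count ' ' + 1 := by
  rw [split_parts, spMeasure]
  have hz : ((splitSp [] num.toList).map String.ofList).map (fun s => s.toList.count ' ')
      = (splitSp [] num.toList).map (fun p => p.count ' ') := by
    simp [List.map_map, Function.comp]
  rw [hz]
  have h0 : ((splitSp [] num.toList).map (fun p => p.count ' ')).sum = 0 := by
    apply List.sum_eq_zero
    intro x hx
    simp only [List.mem_map] at hx
    obtain ⟨p, hp, rfl⟩ := hx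
    exact List.count_eq_zero.mpr (no_space_splitSp num.toList [] p (by simp) hp)
  rw [h0]
  simp [length_splitSp]

theorem isIn_space (num : String) : PySem.Str.isIn " " num = true ↔ ' ' ∈ num.toList := by
  rw [PySem.Str.isIn_iff_infix]
  exact singleton_infix ' ' num.toList

-- port of A: the loop with accumulator `out`, recursing on num.split(' '), then out[:-1]
def get_score_go (out : String) (score : List String) : String :=
  match score with
  | [] => PySem.Str.slice out none (some (-1))
  | num :: rest =>
    if h : PySem.Str.isIn " " num then
      get_score_go (out ++ get_score_go "" ((PySem.Str.split? num " ").getD []) ++ "-") rest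
    else
      get_score_go (out ++ num ++ "-") rest
termination_by spMeasure score
decreasing_by
  · rw [spMeasure_split, spMeasure_cons]
    have : 0 < num.toList.count ' ' :=
      List.count_pos_iff.mpr ((isIn_space num).mp h)
    omega
  · rw [spMeasure_cons]; omega
  · rw [spMeasure_cons]; omega

def get_score_in_dbformat (score : List String) : String :=
  get_score_go "" score

-- ===== PORT B =====
def get_score_in_dbformat_alt (score : List String) : String :=
  PySem.Str.join "-" (score.map (fun num => PySem.Str.replace num " " "-"))

-- ===== PRECONDITION & SPEC =====
def Spec_get_score_in_dbformat (score : List String) (out : String) : Prop := out = get_score_in_dbformat_alt score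
instance (score : List String) (out : String) : Decidable (Spec_get_score_in_dbformat score out) := by unfold Spec_get_score_in_dbformat; infer_instance

-- ===== CLAIM (what is proved, stated in full; the proofs are below) =====
def Claim_equal_get_score_in_dbformat : Prop := ∀ (score : List String), Dom_get_score_in_dbformat score → Spec_get_score_in_dbformat score (get_score_in_dbformat score)

-- ===== LEMMAS AND PROOFS =====
def subSp (c : Char) : Char := if c = ' ' then '-' else c

theorem replace_go_space (l : List Char) : ∀ (fuel : Nat) (acc : List Char),
    l.length ≤ fuel →
    PySem.Chars.replace.go [' '] ['-'] fuel l acc = acc.reverse ++ l.map subSp := by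
  induction l with
  | nil => intro fuel acc h; match fuel with
           | 0 => simp [PySem.Chars.replace.go]
           | fuel+1 => simp [PySem.Chars.replace.go]
  | cons c t ih =>
    intro fuel acc h
    match fuel with
    | fuel+1 =>
      rw [PySem.Chars.replace.go]
      by_cases hc : c = ' '
      · subst hc
        simp only [List.isPrefixOf]
        simp [ih _ _ (by simpa using h), subSp]
      · have hp : [' '].isPrefixOf (c :: t) = false := by
          simp [List.isPrefixOf, Ne.symm hc]
        rw [hp]
        simp only [Bool.false_eq_true, if_false]
        rw [ih _ _ (by simp at h ⊢; omega)]
        simp [subSp, hc]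

theorem replace_space (cs : List Char) : PySem.Chars.replace cs [' '] ['-'] = cs.map subSp := by
  simpa [PySem.Chars.replace] using replace_go_space cs cs.length [] (le_refl _)

theorem map_subSp_of_no_space (p : List Char) (h : ' ' ∉ p) : p.map subSp = p := by
  conv_rhs => rw [← List.map_id p]
  apply List.map_congr_left
  intro c hc
  have : c ≠ ' ' := fun e => h (e ▸ hc)
  simp [subSp, this]

theorem intercalate_cc (a b : List Char) (rest : List (List Char)) :
    List.intercalate ['-'] (a :: b :: rest) = a ++ ['-'] ++ List.intercalate ['-'] (b :: rest) := by
  simp [List.intercalate, List.intersperse]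

theorem intercalate_splitSp (l : List Char) : ∀ cur,
    List.intercalate ['-'] (splitSp cur l) = cur.reverse ++ l.map subSp := by
  induction l with
  | nil => intro cur; simp [splitSp, List.intercalate]
  | cons c t ih =>
    intro cur
    by_cases hc : c = ' '
    · subst hc
      have h1 : splitSp ([] : List Char) t ≠ [] := by
        have := length_splitSp t []
        intro h; rw [h] at this; simp at this
      obtain ⟨p, ps, hps⟩ := List.exists_cons_of_ne_nil h1
      rw [show splitSp cur (' ' :: t) = cur.reverse :: splitSp [] t from by simp [splitSp]]
      rw [hps, intercalate_cc, ← hps, ih]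
      simp [subSp]
    · simp only [splitSp, if_neg hc]
      rw [ih]
      simp [subSp, hc]

def bodySp (score : List String) : List Char :=
  score.flatMap (fun n => n.toList.map subSp ++ ['-'])

theorem flatMap_append_dash : ∀ (ps : List (List Char)), ps ≠ [] →
    ps.flatMap (fun p => p ++ ['-']) = List.intercalate ['-'] ps ++ ['-'] := by
  intro ps
  induction ps with
  | nil => intro h; exact absurd rfl h
  | cons a rest ih =>
    intro _
    match rest with
    | [] => simp [List.intercalate]
    | b :: rs =>
      rw [List.flatMap_cons, ih (by simp), intercalate_cc]
      simp

theorem ofList_inj_str (a b : String) (h : a.toList = b.toList) : a = b := by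
  have : String.ofList a.toList = String.ofList b.toList := by rw [h]
  simpa using this

theorem inner_split_toList (num : String) :
    (bodySp ((PySem.Str.split? num " ").getD [])).dropLast = num.toList.map subSp := by
  rw [split_parts]
  have hne : splitSp ([] : List Char) num.toList ≠ [] := by
    have := length_splitSp num.toList []
    intro h; rw [h] at this; simp at this
  have hbody : bodySp ((splitSp [] num.toList).map String.ofList)
      = (splitSp [] num.toList).flatMap (fun p => p ++ ['-']) := by
    unfold bodySp
    rw [List.flatMap_map]
    apply List.flatMap_congr
    intro p hp
    have hns := no_space_splitSp num.toList [] p (by simp) hp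
    simp [map_subSp_of_no_space p hns]
  rw [hbody, flatMap_append_dash _ hne, List.dropLast_concat, intercalate_splitSp]
  simp

theorem go_toList : ∀ (out : String) (score : List String),
    (get_score_go out score).toList = (out.toList ++ bodySp score).dropLast := by
  intro out score
  induction out, score using get_score_go.induct with
  | case1 out =>
    rw [get_score_go]
    simp [bodySp, PySem.List.slice_to_neg_one]
  | case2 out num rest h ih1 ih2 =>
    rw [get_score_go, dif_pos h]
    rw [ih2]
    have hinner : (get_score_go "" ((PySem.Str.split? num " ").getD [])).toList
        = num.toList.map subSp := by
      rw [ih1]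
      simpa using inner_split_toList num
    simp only [String.toList_append, hinner]
    simp [bodySp]
  | case3 out num rest h ih =>
    rw [get_score_go, dif_neg h]
    rw [ih]
    have hns : ' ' ∉ num.toList := by
      intro hm
      exact h ((isIn_space num).mpr hm)
    simp [bodySp, map_subSp_of_no_space num.toList hns]

theorem alt_toList (score : List String) :
    (get_score_in_dbformat_alt score).toList = (bodySp score).dropLast := by
  unfold get_score_in_dbformat_alt
  simp only [PySem.Str.join, PySem.Str.replace]
  rw [String.toList_ofList]
  have hmap : (score.map (fun num => String.ofList
        (PySem.Chars.replace num.toList " ".toList "-".toList))).map String.toList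
      = score.map (fun num => num.toList.map subSp) := by
    rw [List.map_map]
    apply List.map_congr_left
    intro n _
    show (String.ofList (PySem.Chars.replace n.toList " ".toList "-".toList)).toList = _
    rw [String.toList_ofList]
    have : (" ".toList : List Char) = [' '] := by decide
    have h2 : ("-".toList : List Char) = ['-'] := by decide
    rw [this, h2, replace_space]
  rw [hmap]
  have hdash : ("-".toList : List Char) = ['-'] := by decide
  match score with
  | [] => simp [bodySp, PySem.Chars.join, List.intercalate]
  | n :: rest =>
    have hne : (n :: rest).map (fun num => num.toList.map subSp) ≠ [] := by simp
    have hb : bodySp (n :: rest)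
        = ((n :: rest).map (fun num => num.toList.map subSp)).flatMap (fun p => p ++ ['-']) := by
      simp [bodySp, List.flatMap_map]
    rw [hb, flatMap_append_dash _ hne, List.dropLast_concat]
    simp [PySem.Chars.join, hdash]

-- ===== VERDICT (by name: the statement is the Claim_ definition above) =====
theorem get_score_in_dbformat_spec : Claim_equal_get_score_in_dbformat := by
  intro score _
  unfold Spec_get_score_in_dbformat get_score_in_dbformat
  apply ofList_inj_str
  rw [go_toList "" score, alt_toList]
  simp
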